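-- pv_equiv track=rewrite | github.com/biscayan/Python_algorithm | This_is_codingtest/그리디/모험가길드.py | Go_travel
-- ===== SOURCE A (Python) =====
-- def Go_travel(guild):
--
--     guild.sort()
--
--     answer = 0
--     count = 0
--
--     for fear in guild:
--
--         count += 1
--
--         ###현재 인원이 어떤 사람의 공포도와 같거가 크다면 출발
--         if count >= fear:
--
--             answer += 1
--             ###인원 초기화
--             count = 0
--
--     return answer
-- ===== SOURCE B (Python) =====
-- def Go_travel(guild):
--     guild.sort()
--     answer = 0
--     pool = 0
--     i = 0
--     n = len(guild)
--     while i < n: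
--         v = guild[i]
--         j = i
--         while j < n and guild[j] == v:
--             j += 1
--         k = j - i
--         if v <= 0:
--             # each such adventurer departs alone (count 1 >= fear <= 0); pool is 0 here
--             answer += pool + k
--             pool = 0
--         else:
--             pool += k
--             answer += pool // v
--             pool %= v
--         i = j
--     return answer
-- ===== Notes on version B (the rewrite author's own statement) =====
-- stated objective: alternative
-- what changed: Replaces the per-element increment/reset scan with a per-distinct-value pass over runs of equal fear: each run's size is added to a carry-over pool and groups are taken by integer division, with a closed-form branch for non-positive fears.
import Mathlib
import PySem

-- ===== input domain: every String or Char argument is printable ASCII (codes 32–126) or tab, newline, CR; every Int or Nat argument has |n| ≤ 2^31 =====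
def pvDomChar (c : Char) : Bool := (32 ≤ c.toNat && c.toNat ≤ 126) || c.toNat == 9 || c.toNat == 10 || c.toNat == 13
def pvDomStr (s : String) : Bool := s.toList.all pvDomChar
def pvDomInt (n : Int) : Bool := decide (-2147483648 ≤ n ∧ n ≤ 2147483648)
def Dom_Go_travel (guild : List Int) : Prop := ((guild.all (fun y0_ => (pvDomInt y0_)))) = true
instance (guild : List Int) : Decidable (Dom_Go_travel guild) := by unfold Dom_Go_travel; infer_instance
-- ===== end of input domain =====

-- B replaces A's per-element increment/reset scan with a per-run-of-equal-fears arithmetic pass (same cost);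
-- both Pythons sort `guild` in place: the equivalence proved here is about the RETURN value.

-- ===== PORT A =====
def Go_travel (guild : List Int) : Int :=
  let g := PySem.List.sorted guild (fun x => x) false
  (g.foldl (fun (st : Int × Int) fear =>
      let count := st.2 + 1
      if count ≥ fear then (st.1 + 1, 0) else (st.1, count)) (0, 0)).1

-- ===== PORT B =====
-- the inner `while guild[j] == v` run scan is the takeWhile/dropWhile split
def goAltLoop : List Int → Int → Int → Int
  | [], ans, _ => ans
  | v :: rest, ans, pool =>
      let run := rest.takeWhile (· == v)
      let rest' := rest.dropWhile (· == v)
      let k : Int := 1 + run.length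
      if v ≤ 0 then
        goAltLoop rest' (ans + pool + k) 0
      else
        let pool' := pool + k
        goAltLoop rest' (ans + PySem.Int.floordiv pool' v) (PySem.Int.mod pool' v)
termination_by l => l.length
decreasing_by
  all_goals simpa using Nat.lt_succ_of_le (List.length_dropWhile_le _ _)

def Go_travel_alt (guild : List Int) : Int :=
  goAltLoop (PySem.List.sorted guild (fun x => x) false) 0 0

-- ===== PRECONDITION & SPEC =====
def Spec_Go_travel (guild : List Int) (out : Int) : Prop := out = Go_travel_alt guild
instance (guild : List Int) (out : Int) : Decidable (Spec_Go_travel guild out) := by unfold Spec_Go_travel; infer_instance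

-- ===== CLAIM (what is proved, stated in full; the proofs are below) =====
def Claim_equal_Go_travel : Prop := ∀ (guild : List Int), Dom_Go_travel guild → Spec_Go_travel guild (Go_travel guild)

-- ===== LEMMAS AND PROOFS =====

-- A's loop body, as a named step function
def goStep (st : Int × Int) (fear : Int) : Int × Int :=
  let count := st.2 + 1
  if count ≥ fear then (st.1 + 1, 0) else (st.1, count)

theorem goA_eq_foldl (guild : List Int) :
    Go_travel guild = ((PySem.List.sorted guild (fun x => x) false).foldl goStep (0, 0)).1 := rfl

theorem goStep_group (a c v : Int) (h : v ≤ c + 1) : goStep (a, c) v = (a + 1, 0) := by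
  simp [goStep, h]

theorem goStep_wait (a c v : Int) (h : ¬ v ≤ c + 1) : goStep (a, c) v = (a, c + 1) := by
  simp [goStep, h]

-- processing j copies of a positive fear v from count c (0 ≤ c < v) forms ⌊(c+j)/v⌋ groups
theorem foldl_replicate_pos (v : Int) (hv : 0 < v) :
    ∀ (j : Nat) (a c : Int), 0 ≤ c → c < v →
      (List.foldl goStep (a, c) (List.replicate j v)) = (a + (c + j) / v, (c + j) % v) := by
  intro j
  induction j with
  | zero =>
      intro a c hc0 hcv
      simp [Int.ediv_eq_zero_of_lt hc0 hcv, Int.emod_eq_of_lt hc0 hcv]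
  | succ n ih =>
      intro a c hc0 hcv
      rw [List.replicate_succ, List.foldl_cons]
      by_cases h : v ≤ c + 1
      · rw [goStep_group a c v h, ih (a + 1) 0 le_rfl hv]
        have hc1 : c + 1 = v := by omega
        have h1 : c + ((n : Int) + 1) = (n : Int) + v * 1 := by omega
        have hd2 : (c + ((n : Int) + 1)) / v = (n : Int) / v + 1 := by
          rw [h1]; exact Int.add_mul_ediv_left (n : Int) 1 (by omega : v ≠ 0)
        have hm2 : (c + ((n : Int) + 1)) % v = (n : Int) % v := by
          rw [h1]; exact Int.add_mul_emod_self_left (a := (n : Int)) (b := v) (c := 1)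
        refine Prod.ext ?_ ?_
        · push_cast; rw [hd2]; ring
        · push_cast; rw [hm2]; simp
      · rw [goStep_wait a c v h, ih a (c + 1) (by omega) (by omega)]
        refine Prod.ext ?_ ?_ <;> push_cast <;> ring_nf
  
-- each adventurer with non-positive fear departs alone
theorem foldl_replicate_nonpos (v : Int) (hv : v ≤ 0) :
    ∀ (j : Nat) (a : Int),
      List.foldl goStep (a, 0) (List.replicate j v) = (a + j, 0) := by
  intro j
  induction j with
  | zero => intro a; simp
  | succ n ih =>
      intro a
      rw [List.replicate_succ, List.foldl_cons, goStep_group a 0 v (by omega), ih]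
      refine Prod.ext ?_ ?_ <;> push_cast <;> ring_nf

-- the main run-by-run equivalence, by induction on a length bound
theorem main_loop (N : Nat) : ∀ (l : List Int), l.length ≤ N →
    l.Pairwise (· ≤ ·) →
    ∀ a c : Int, 0 ≤ c →
      (∀ x ∈ l, 0 < x → c < x) →
      (c = 0 ∨ ∀ x ∈ l, 0 < x) →
      (l.foldl goStep (a, c)).1 = goAltLoop l a c := by
  induction N with
  | zero =>
      intro l hl _ a c _ _ _
      have : l = [] := List.eq_nil_of_length_eq_zero (by omega)
      subst this; simp [goAltLoop]
  | succ N ih =>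
      intro l hl hpair a c hc0 hlt hzero
      cases l with
      | nil => simp [goAltLoop]
      | cons v rest =>
        have hsplit : rest = rest.takeWhile (· == v) ++ rest.dropWhile (· == v) :=
          (List.takeWhile_append_dropWhile).symm
        set run := rest.takeWhile (· == v) with hrun
        set rest' := rest.dropWhile (· == v) with hrest'
        have hrunv : ∀ x ∈ run, x = v := by
          intro x hx
          have := List.mem_takeWhile_imp hx
          simpa using this
        have hrunrep : run = List.replicate run.length v := List.eq_replicate_of_mem hrunv
        have hrest'sub : rest'.Sublist rest := List.dropWhile_sublist _
        have hrest'pair : rest'.Pairwise (· ≤ ·) := hpair.of_cons.sublist hrest'sub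
        have hvle : ∀ x ∈ rest, v ≤ x := fun x hx => (List.pairwise_cons.mp hpair).1 x hx
        have hvle' : ∀ x ∈ rest', v ≤ x := fun x hx => hvle x (hrest'sub.mem hx)
        have hlen : rest'.length ≤ N := by
          have := List.length_dropWhile_le (p := (· == v)) rest
          simp only [← hrest'] at this
          simp at hl; omega
        have hfold : (v :: rest).foldl goStep (a, c)
            = rest'.foldl goStep ((v :: run).foldl goStep (a, c)) := by
          conv_lhs => rw [show v :: rest = (v :: run) ++ rest' by rw [List.cons_append, ← hsplit]]
          rw [List.foldl_append]
        by_cases hv : v ≤ 0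
        -- non-positive run: c = 0 here, each person departs alone
        · have hc : c = 0 := by
            rcases hzero with h | h
            · exact h
            · exact absurd (h v (by simp)) (by omega)
          subst hc
          have hfront : (v :: run).foldl goStep (a, 0) = (a + (1 + run.length), 0) := by
            rw [List.foldl_cons, goStep_group a 0 v (by omega), hrunrep,
                foldl_replicate_nonpos v hv]
            refine Prod.ext ?_ ?_ <;> simp <;> ring_nf
          rw [hfold, hfront,
              ih rest' hlen hrest'pair _ 0 le_rfl (fun x _ hx => hx) (Or.inl rfl)]
          conv_rhs => rw [goAltLoop]
          simp only [← hrun, ← hrest', if_pos hv]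
          ring_nf
        -- positive run: divide the pool
        · replace hv : 0 < v := by omega
          have hcv : c < v := hlt v (by simp) hv
          have hfront : (v :: run).foldl goStep (a, c)
              = (a + (c + (1 + run.length)) / v, (c + (1 + run.length)) % v) := by
            have hrep : v :: run = List.replicate (run.length + 1) v := by
              rw [List.replicate_succ, ← hrunrep]
            rw [hrep, foldl_replicate_pos v hv (run.length + 1) a c hc0 hcv]
            refine Prod.ext ?_ ?_ <;> push_cast <;> ring_nf
          have hmodlt : (c + (1 + (run.length : Int))) % v < v := Int.emod_lt_of_pos _ hv
          have hmod0 : 0 ≤ (c + (1 + (run.length : Int))) % v := Int.emod_nonneg _ (by omega)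
          rw [hfold, hfront,
              ih rest' hlen hrest'pair _ _ hmod0
                (fun x hx _ => lt_of_lt_of_le hmodlt (hvle' x hx))
                (Or.inr (fun x hx => lt_of_lt_of_le hv (hvle' x hx)))]
          conv_rhs => rw [goAltLoop]
          simp only [← hrun, ← hrest', if_neg (by omega : ¬ v ≤ 0)]
          rw [PySem.Int.floordiv_eq_ediv_of_pos hv, PySem.Int.mod_eq_emod_of_pos hv]

-- ===== VERDICT (by name: the statement is the Claim_ definition above) =====
theorem Go_travel_spec : Claim_equal_Go_travel := by
  intro guild _
  unfold Spec_Go_travel Go_travel_alt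
  rw [goA_eq_foldl]
  exact main_loop _ _ le_rfl (PySem.List.sorted_pairwise guild (fun x => x)) 0 0 le_rfl
    (fun _ _ h => h) (Or.inl rfl)
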